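-- pv_equiv track=rewrite | github.com/zaynab-nachabe/killer_project3 | chat_killer_server.py | parse_private_message
-- ===== SOURCE A (Python) =====
-- def parse_private_message(client_message):
--     # check how many pseudoes are in the message
--     # parse until the word doesn't start with @
--     pseudo = []
--     message_split = client_message.split(' ')
--     while message_split[0].startswith('@'):
--         pseudo.append(message_split[0][1:])
--         message_split = message_split[1:]
--     message = ' '.join(message_split)
--     return pseudo, message
-- ===== SOURCE B (Python) =====
-- def parse_private_message(client_message):
--     tokens = client_message.split(' ')
--     i = 0
--     while i < len(tokens) and tokens[i].startswith('@'):
--         i += 1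
--     return [t[1:] for t in tokens[:i]], ' '.join(tokens[i:])
-- ===== Notes on version B (the rewrite author's own statement) =====
-- stated objective: simpler
-- what changed: B finds the pseudo/message boundary with a single index scan and then extracts the pseudos and the message in two separate passes (comprehension + join on slices), instead of A's interleaved append-and-peel loop that repeatedly re-slices the token list.
-- outside the precondition, e.g. on parse_private_message('@a @b'): A raises IndexError, B returns (['a', 'b'], ''); on parse_private_message('@'): A raises IndexError, B returns ([''], '')
import Mathlib
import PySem

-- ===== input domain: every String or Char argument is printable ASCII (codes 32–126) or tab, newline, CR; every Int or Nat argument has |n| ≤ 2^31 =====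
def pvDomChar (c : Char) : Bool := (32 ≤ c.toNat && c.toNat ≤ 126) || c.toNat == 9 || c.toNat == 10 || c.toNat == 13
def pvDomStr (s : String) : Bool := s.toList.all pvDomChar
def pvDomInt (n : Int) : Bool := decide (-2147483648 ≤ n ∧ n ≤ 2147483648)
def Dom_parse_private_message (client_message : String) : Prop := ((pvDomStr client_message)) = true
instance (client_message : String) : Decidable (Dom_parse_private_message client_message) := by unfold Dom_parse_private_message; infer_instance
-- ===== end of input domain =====

-- B finds the pseudo/message boundary first, then extracts the pseudos and the message in two
-- separate passes, instead of A's interleaved append-and-peel loop (objective: simpler).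

-- ===== PORT A =====
-- A's while loop: peel leading '@' tokens, collecting pseudo; empty list means Python's
-- message_split[0] raises IndexError — excluded by Pre_ (port returns a dummy there).
def pvLoopA : List String → List (List Char) → List String × String
  | pseudo, [] => (pseudo, "")
  | pseudo, w :: rest =>
    if PySem.Chars.startswith w ['@'] then
      pvLoopA (pseudo ++ [String.mk (PySem.Chars.slice w (some 1) none)]) rest
    else
      (pseudo, String.mk (PySem.Chars.join [' '] (w :: rest)))

def parse_private_message (client_message : String) : List String × String :=
  pvLoopA [] (PySem.Chars.splitOn client_message.toList [' '])

-- ===== PORT B =====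
-- i = 0; while i < len(tokens) and tokens[i].startswith('@'): i += 1
def pvBoundary : List (List Char) → Nat
  | [] => 0
  | w :: rest => if PySem.Chars.startswith w ['@'] then pvBoundary rest + 1 else 0

def parse_private_message_alt (client_message : String) : List String × String :=
  let tokens := PySem.Chars.splitOn client_message.toList [' ']
  let i := pvBoundary tokens
  ((tokens.take i).map (fun t => String.mk (PySem.Chars.slice t (some 1) none)),
   String.mk (PySem.Chars.join [' '] (tokens.drop i)))

-- ===== PRECONDITION & SPEC =====
-- A raises IndexError exactly when every space-split token starts with '@'; Pre_ excludes those.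
def Pre_parse_private_message (client_message : String) : Prop :=
  ∃ t ∈ PySem.Chars.splitOn client_message.toList [' '], PySem.Chars.startswith t ['@'] = false
instance (client_message : String) : Decidable (Pre_parse_private_message client_message) := by
  unfold Pre_parse_private_message; infer_instance
def pvWitness_parse_private_message : String := "@bob hi there"

def Spec_parse_private_message (client_message : String) (out : List String × String) : Prop :=
  out = parse_private_message_alt client_message
instance (client_message : String) (out : List String × String) : Decidable (Spec_parse_private_message client_message out) := by
  unfold Spec_parse_private_message; infer_instance

-- ===== CLAIM (what is proved, stated in full; the proofs are below) =====
def Claim_equal_parse_private_message : Prop := ∀ (client_message : String), Dom_parse_private_message client_message → Pre_parse_private_message client_message → Spec_parse_private_message client_message (parse_private_message client_message)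

-- ===== LEMMAS AND PROOFS =====

-- A's peel loop computed via B's boundary: valid whenever some token is not an '@' token.
theorem pvLoopA_eq (ts : List (List Char))
    (h : ∃ t ∈ ts, PySem.Chars.startswith t ['@'] = false) (acc : List String) :
    pvLoopA acc ts =
      (acc ++ (ts.take (pvBoundary ts)).map (fun t => String.mk (PySem.Chars.slice t (some 1) none)),
       String.mk (PySem.Chars.join [' '] (ts.drop (pvBoundary ts)))) := by
  induction ts generalizing acc with
  | nil => rcases h with ⟨t, ht, _⟩; cases ht
  | cons w rest ih =>
    by_cases hw : PySem.Chars.startswith w ['@'] = true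
    · have hr : ∃ t ∈ rest, PySem.Chars.startswith t ['@'] = false := by
        rcases h with ⟨t, ht, hf⟩
        rcases List.mem_cons.mp ht with rfl | hm
        · simp [hw] at hf
        · exact ⟨t, hm, hf⟩
      simp [pvLoopA, pvBoundary, hw, ih hr]
    · simp [pvLoopA, pvBoundary, hw]

-- ===== VERDICT (by name: the statement is the Claim_ definition above) =====
theorem parse_private_message_spec : Claim_equal_parse_private_message := by
  intro s _ hpre
  unfold Spec_parse_private_message parse_private_message parse_private_message_alt
  simpa using pvLoopA_eq (PySem.Chars.splitOn s.toList [' ']) hpre []
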